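-- pv_equiv track=rewrite | github.com/hervebronnimann/adventofcode | 2016/11/11.2.py | hashpair
-- ===== SOURCE A (Python) =====
-- def hashpair(f):
--     """ The idea is to count the number of matched pairs and keep only the rest """
--     n,p = 0,[]
--     for x in f:
--         if x[0]=='+':
--             if '-'+x[1:] in f: n+=1
--             else: p += [x]
--         elif x[0]=='-':
--             if '+'+x[1:] in f: n+=1
--             else: p += [x]
--     return(n,tuple(p))
-- ===== SOURCE B (Python) =====
-- def hashpair(f):
--     """Group signed elements by base into two dicts; count matched groups arithmetically,
--     rebuild the unmatched elements in original order by sorting their stored indices."""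
--     plus, minus = {}, {}
--     for i, x in enumerate(f):
--         if x[0] == '+':
--             plus.setdefault(x[1:], []).append((i, x))
--         elif x[0] == '-':
--             minus.setdefault(x[1:], []).append((i, x))
--     n = 0
--     keep = []
--     for d, other in ((plus, minus), (minus, plus)):
--         for base, occs in d.items():
--             if base in other:
--                 n += len(occs)
--             else:
--                 keep.extend(occs)
--     keep.sort(key=lambda t: t[0])
--     return (n, tuple(x for _, x in keep))
-- ===== Notes on version B (the rewrite author's own statement) =====
-- stated objective: alternative
-- what changed: A scans f once and, for every signed element, rescans all of f for the opposite string, appending unmatched elements as it goes; B instead groups the signed elements by their sign-stripped base into two insertion-ordered dicts of (index, element) occurrence lists, computes n arithmetically as the sum of group sizes whose base appears in the opposite dict, and rebuilds the unmatched elements in original order by sorting the surviving (index, element) pairs by index - a group-by-and-merge algorithm with no membership scan of f at all.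
import Mathlib
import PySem

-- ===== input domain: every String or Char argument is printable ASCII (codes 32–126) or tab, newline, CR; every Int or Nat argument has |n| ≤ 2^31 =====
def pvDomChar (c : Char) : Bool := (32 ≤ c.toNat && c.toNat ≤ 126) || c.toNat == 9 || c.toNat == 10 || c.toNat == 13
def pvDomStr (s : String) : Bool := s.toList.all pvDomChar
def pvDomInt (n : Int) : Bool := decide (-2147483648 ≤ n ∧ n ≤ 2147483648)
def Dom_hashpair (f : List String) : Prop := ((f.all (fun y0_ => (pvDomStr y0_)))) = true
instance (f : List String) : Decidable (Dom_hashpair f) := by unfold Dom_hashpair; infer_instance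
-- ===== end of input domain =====

-- B replaces A's per-element rescans of f by a group-by-base algorithm: two dicts of
-- (index, element) occurrence lists per sign, an arithmetic count of the matched groups,
-- and an index sort rebuilding the unmatched elements in order (objective: alternative).
-- Strings are handled on the .toList side; exact on the admitted inputs.

-- ===== PORT A =====
-- loop body of A, as a helper ('-'+x[1:] in f == f has an element whose chars are '-' :: x[1:])
def pvAStep (f : List String) (st : Int × List String) (x : String) : Int × List String :=
  if PySem.Chars.pyGet? x.toList 0 == some '+' then
    if f.any (fun y => y.toList == '-' :: PySem.Chars.slice x.toList (some 1) none)
    then (st.1 + 1, st.2) else (st.1, st.2 ++ [x])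
  else if PySem.Chars.pyGet? x.toList 0 == some '-' then
    if f.any (fun y => y.toList == '+' :: PySem.Chars.slice x.toList (some 1) none)
    then (st.1 + 1, st.2) else (st.1, st.2 ++ [x])
  else st

def hashpair (f : List String) : Int × List String :=
  f.foldl (pvAStep f) (0, [])

-- ===== PORT B =====
-- body of B's first loop: plus.setdefault(x[1:], []).append((i, x)) (resp. minus)
def pvBStep
    (st : PySem.Dict (List Char) (List (Int × String)) × PySem.Dict (List Char) (List (Int × String)))
    (p : Int × String) :
    PySem.Dict (List Char) (List (Int × String)) × PySem.Dict (List Char) (List (Int × String)) :=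
  if PySem.Chars.pyGet? p.2.toList 0 == some '+' then
    (st.1.modify (PySem.Chars.slice p.2.toList (some 1) none) [] (· ++ [p]), st.2)
  else if PySem.Chars.pyGet? p.2.toList 0 == some '-' then
    (st.1, st.2.modify (PySem.Chars.slice p.2.toList (some 1) none) [] (· ++ [p]))
  else st

-- body of B's second loop: one round of 'for base, occs in d.items(): ...' against 'other'
def pvBPhase (other : PySem.Dict (List Char) (List (Int × String)))
    (st : Int × List (Int × String))
    (d : PySem.Dict (List Char) (List (Int × String))) : Int × List (Int × String) :=
  d.items.foldl (fun st pr =>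
    if other.contains pr.1 then (st.1 + PySem.List.len pr.2, st.2) else (st.1, st.2 ++ pr.2)) st

def hashpair_alt (f : List String) : Int × List String :=
  let dicts := (PySem.List.enumerate f).foldl pvBStep (PySem.Dict.empty, PySem.Dict.empty)
  let st := pvBPhase dicts.1 (pvBPhase dicts.2 (0, []) dicts.1) dicts.2
  let keep := PySem.List.sorted st.2 (fun t => t.1) false
  (st.1, keep.map (fun t => t.2))

-- ===== PRECONDITION & SPEC =====
-- Pre_ excludes lists containing the empty string, on which A raises IndexError at x[0] (B raises there too).
def Pre_hashpair (f : List String) : Prop := ∀ x ∈ f, x ≠ ""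
instance (f : List String) : Decidable (Pre_hashpair f) := by unfold Pre_hashpair; infer_instance
def pvWitness_hashpair : List String := ["+ab", "-ab", "+c", "xq", "-", "+ab"]

def Spec_hashpair (f : List String) (out : Int × List String) : Prop := out = hashpair_alt f
instance (f : List String) (out : Int × List String) : Decidable (Spec_hashpair f out) := by unfold Spec_hashpair; infer_instance

-- ===== CLAIM =====
def Claim_equal_hashpair : Prop := ∀ (f : List String), Dom_hashpair f → Pre_hashpair f → Spec_hashpair f (hashpair f)

-- ===== LEMMAS AND PROOFS =====

-- proof-side abbreviations for the predicates both programs branch on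
def pvIsP (x : String) : Bool := PySem.Chars.pyGet? x.toList 0 == some '+'
def pvIsM (x : String) : Bool := PySem.Chars.pyGet? x.toList 0 == some '-'
def pvBase (x : String) : List Char := PySem.Chars.slice x.toList (some 1) none
def pvOpp (f : List String) (c : Char) (x : String) : Bool :=
  f.any (fun y => y.toList == c :: pvBase x)
def pvCnt (f : List String) (x : String) : Bool :=
  (pvIsP x && pvOpp f '-' x) || (pvIsM x && pvOpp f '+' x)
def pvKeep (f : List String) (x : String) : Bool :=
  (pvIsP x && !pvOpp f '-' x) || (pvIsM x && !pvOpp f '+' x)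

theorem pvA_char (f : List String) : ∀ (g : List String) (n : Int) (p : List String),
    g.foldl (pvAStep f) (n, p) = (n + (g.countP (pvCnt f) : Int), p ++ g.filter (pvKeep f)) := by
  intro g
  induction g with
  | nil => intro n p; simp
  | cons x g ih =>
    intro n p
    rw [List.foldl_cons, List.countP_cons, List.filter_cons]
    by_cases hp : (PySem.Chars.pyGet? x.toList 0 == some '+') = true
    · have hp' : PySem.List.pyGet? x.toList 0 = some '+' := by
        simpa [beq_iff_eq, PySem.Chars.pyGet?_eq_listPyGet?, PySem.Chars.slice_eq_listSlice] using hp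
      have hm' : ¬ PySem.List.pyGet? x.toList 0 = some '-' := by simp [hp']
      by_cases ho : (f.any fun y => y.toList == '-' :: PySem.Chars.slice x.toList (some 1) none) = true
      · have ho' : ∃ y ∈ f, y.toList = '-' :: PySem.List.slice x.toList (some 1) none := by
          simpa [List.any_eq_true, beq_iff_eq, PySem.Chars.pyGet?_eq_listPyGet?, PySem.Chars.slice_eq_listSlice] using ho
        have hs : pvAStep f (n, p) x = (n + 1, p) := by
          unfold pvAStep; rw [if_pos hp, if_pos ho]
        have h1 : pvCnt f x = true := by
          simp [pvCnt, pvIsP, pvOpp, pvBase, PySem.Chars.pyGet?_eq_listPyGet?, PySem.Chars.slice_eq_listSlice, hp', ho']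
        have h2 : pvKeep f x = false := by
          simp [pvKeep, pvIsP, pvIsM, pvOpp, pvBase, PySem.Chars.pyGet?_eq_listPyGet?, PySem.Chars.slice_eq_listSlice, hp', hm', ho']
        rw [hs, ih, h2]
        simp [h1]; omega
      · have ho' : ∀ y ∈ f, ¬ y.toList = '-' :: PySem.List.slice x.toList (some 1) none := by
          rw [Bool.not_eq_true] at ho
          simpa [List.any_eq_false, beq_iff_eq, PySem.Chars.pyGet?_eq_listPyGet?, PySem.Chars.slice_eq_listSlice] using ho
        have hs : pvAStep f (n, p) x = (n, p ++ [x]) := by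
          unfold pvAStep; rw [if_pos hp, if_neg ho]
        have h1 : pvCnt f x = false := by
          simp [pvCnt, pvIsP, pvIsM, pvOpp, pvBase, PySem.Chars.pyGet?_eq_listPyGet?, PySem.Chars.slice_eq_listSlice, hm', ho']
          exact fun _ => ho' 
        have h2 : pvKeep f x = true := by
          simp [pvKeep, pvIsP, pvOpp, pvBase, PySem.Chars.pyGet?_eq_listPyGet?, PySem.Chars.slice_eq_listSlice, hp', ho']
          exact Or.inl ho'
        rw [hs, ih, h2]
        simp [h1]
    · have hp' : ¬ PySem.List.pyGet? x.toList 0 = some '+' := by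
        rw [Bool.not_eq_true] at hp
        simpa [beq_iff_eq, PySem.Chars.pyGet?_eq_listPyGet?, PySem.Chars.slice_eq_listSlice] using hp
      by_cases hm : (PySem.Chars.pyGet? x.toList 0 == some '-') = true
      · have hm' : PySem.List.pyGet? x.toList 0 = some '-' := by
          simpa [beq_iff_eq, PySem.Chars.pyGet?_eq_listPyGet?, PySem.Chars.slice_eq_listSlice] using hm
        by_cases ho : (f.any fun y => y.toList == '+' :: PySem.Chars.slice x.toList (some 1) none) = true
        · have ho' : ∃ y ∈ f, y.toList = '+' :: PySem.List.slice x.toList (some 1) none := by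
            simpa [List.any_eq_true, beq_iff_eq, PySem.Chars.pyGet?_eq_listPyGet?, PySem.Chars.slice_eq_listSlice] using ho
          have hs : pvAStep f (n, p) x = (n + 1, p) := by
            unfold pvAStep; rw [if_neg (by simpa [beq_iff_eq, PySem.Chars.pyGet?_eq_listPyGet?, PySem.Chars.slice_eq_listSlice] using hp'), if_pos hm, if_pos ho]
          have h1 : pvCnt f x = true := by
            simp [pvCnt, pvIsM, pvOpp, pvBase, PySem.Chars.pyGet?_eq_listPyGet?, PySem.Chars.slice_eq_listSlice, hm', ho']
          have h2 : pvKeep f x = false := by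
            simp [pvKeep, pvIsP, pvIsM, pvOpp, pvBase, PySem.Chars.pyGet?_eq_listPyGet?, PySem.Chars.slice_eq_listSlice, hp', hm', ho']
          rw [hs, ih, h2]
          simp [h1]; omega
        · have ho' : ∀ y ∈ f, ¬ y.toList = '+' :: PySem.List.slice x.toList (some 1) none := by
            rw [Bool.not_eq_true] at ho
            simpa [List.any_eq_false, beq_iff_eq, PySem.Chars.pyGet?_eq_listPyGet?, PySem.Chars.slice_eq_listSlice] using ho
          have hs : pvAStep f (n, p) x = (n, p ++ [x]) := by
            unfold pvAStep; rw [if_neg (by simpa [beq_iff_eq, PySem.Chars.pyGet?_eq_listPyGet?, PySem.Chars.slice_eq_listSlice] using hp'), if_pos hm, if_neg ho]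
          have h1 : pvCnt f x = false := by
            simp [pvCnt, pvIsP, pvIsM, pvOpp, pvBase, PySem.Chars.pyGet?_eq_listPyGet?, PySem.Chars.slice_eq_listSlice, hp', ho']
            exact fun _ => ho' 
          have h2 : pvKeep f x = true := by
            simp [pvKeep, pvIsM, pvOpp, pvBase, PySem.Chars.pyGet?_eq_listPyGet?, PySem.Chars.slice_eq_listSlice, hm', ho']
            exact Or.inr ho' 
          rw [hs, ih, h2]
          simp [h1]
      · have hm' : ¬ PySem.List.pyGet? x.toList 0 = some '-' := by
          rw [Bool.not_eq_true] at hm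
          simpa [beq_iff_eq, PySem.Chars.pyGet?_eq_listPyGet?, PySem.Chars.slice_eq_listSlice] using hm
        have hs : pvAStep f (n, p) x = (n, p) := by
          unfold pvAStep
          rw [if_neg (by simpa [beq_iff_eq, PySem.Chars.pyGet?_eq_listPyGet?, PySem.Chars.slice_eq_listSlice] using hp'), if_neg (by simpa [beq_iff_eq, PySem.Chars.pyGet?_eq_listPyGet?, PySem.Chars.slice_eq_listSlice] using hm')]
        have h1 : pvCnt f x = false := by simp [pvCnt, pvIsP, pvIsM, PySem.Chars.pyGet?_eq_listPyGet?, PySem.Chars.slice_eq_listSlice, hp', hm']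
        have h2 : pvKeep f x = false := by simp [pvKeep, pvIsP, pvIsM, PySem.Chars.pyGet?_eq_listPyGet?, PySem.Chars.slice_eq_listSlice, hp', hm']
        rw [hs, ih, h2]
        simp [h1]

def pvMod (d : PySem.Dict (List Char) (List (Int × String)))
    (q : List Char × (Int × String)) : PySem.Dict (List Char) (List (Int × String)) :=
  d.modify q.1 [] (· ++ [q.2])

def pvPairs (c : Char) (l : List (Int × String)) : List (List Char × (Int × String)) :=
  (l.filter (fun p => PySem.Chars.pyGet? p.2.toList 0 == some c)).map (fun p => (pvBase p.2, p))

theorem pvBuild_split : ∀ (l : List (Int × String))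
    (d1 d2 : PySem.Dict (List Char) (List (Int × String))),
    l.foldl pvBStep (d1, d2) = ((pvPairs '+' l).foldl pvMod d1, (pvPairs '-' l).foldl pvMod d2) := by
  intro l
  induction l with
  | nil => intro d1 d2; simp [pvPairs]
  | cons p l ih =>
    intro d1 d2
    rw [List.foldl_cons]
    by_cases hp : (PySem.Chars.pyGet? p.2.toList 0 == some '+') = true
    · have hp' : PySem.List.pyGet? p.2.toList 0 = some '+' := by simpa [beq_iff_eq, PySem.Chars.pyGet?_eq_listPyGet?] using hp
      have hmf : ¬ PySem.List.pyGet? p.2.toList 0 = some '-' := by simp [hp']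
      have hs : pvBStep (d1, d2) p
          = (pvMod d1 (pvBase p.2, p), d2) := by
        unfold pvBStep pvMod pvBase; rw [if_pos hp]
      have e1 : pvPairs '+' (p :: l) = (pvBase p.2, p) :: pvPairs '+' l := by
        simp [pvPairs, List.filter_cons, hp']
      have e2 : pvPairs '-' (p :: l) = pvPairs '-' l := by
        simp [pvPairs, List.filter_cons, hmf]
      rw [hs, ih, e1, e2, List.foldl_cons]
    · rw [Bool.not_eq_true] at hp
      have hp' : ¬ PySem.List.pyGet? p.2.toList 0 = some '+' := by simpa [beq_iff_eq, PySem.Chars.pyGet?_eq_listPyGet?] using hp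
      have e1 : pvPairs '+' (p :: l) = pvPairs '+' l := by
        simp [pvPairs, List.filter_cons, hp']
      by_cases hm : (PySem.Chars.pyGet? p.2.toList 0 == some '-') = true
      · have hm' : PySem.List.pyGet? p.2.toList 0 = some '-' := by simpa [beq_iff_eq, PySem.Chars.pyGet?_eq_listPyGet?] using hm
        have hs : pvBStep (d1, d2) p = (d1, pvMod d2 (pvBase p.2, p)) := by
          unfold pvBStep pvMod pvBase; rw [if_neg (by simp [hp']), if_pos hm]
        have e2 : pvPairs '-' (p :: l) = (pvBase p.2, p) :: pvPairs '-' l := by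
          simp [pvPairs, List.filter_cons, hm']
        rw [hs, ih, e1, e2, List.foldl_cons]
      · rw [Bool.not_eq_true] at hm
        have hm' : ¬ PySem.List.pyGet? p.2.toList 0 = some '-' := by simpa [beq_iff_eq, PySem.Chars.pyGet?_eq_listPyGet?] using hm
        have hs : pvBStep (d1, d2) p = (d1, d2) := by
          unfold pvBStep; rw [if_neg (by simp [hp']), if_neg (by simp [hm'])]
        have e2 : pvPairs '-' (p :: l) = pvPairs '-' l := by
          simp [pvPairs, List.filter_cons, hm']
        rw [hs, ih, e1, e2]

theorem pvPhase_char (other : PySem.Dict (List Char) (List (Int × String))) :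
    ∀ (its : List (List Char × List (Int × String))) (n : Int) (keep : List (Int × String)),
    its.foldl (fun st pr =>
        if other.contains pr.1 then (st.1 + PySem.List.len pr.2, st.2) else (st.1, st.2 ++ pr.2)) (n, keep)
      = (n + ((((its.filter (fun pr => other.contains pr.1)).flatMap (·.2)).length : Nat) : Int),
         keep ++ (its.filter (fun pr => !other.contains pr.1)).flatMap (·.2)) := by
  intro its
  induction its with
  | nil => intro n keep; simp
  | cons pr its ih =>
    intro n keep
    rw [List.foldl_cons, List.filter_cons, List.filter_cons]
    by_cases hc : other.contains pr.1 = true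
    · rw [if_pos hc, ih]
      simp [hc, PySem.List.len_eq]
      omega
    · rw [Bool.not_eq_true] at hc
      rw [if_neg (by simp [hc]), ih]
      simp [hc]

theorem pvPerm_flatMap_filter {α κ : Type} [DecidableEq κ] (key : α → κ) :
    ∀ (ks : List κ), ks.Nodup → ∀ (L : List α), (∀ p ∈ L, key p ∈ ks) →
    (ks.flatMap (fun b => L.filter (fun p => key p = b))).Perm L := by
  intro ks
  induction ks with
  | nil =>
    intro _ L hcov
    have : L = [] := List.eq_nil_iff_forall_not_mem.2 (fun p hp => by simpa using hcov p hp)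
    simp [this]
  | cons k ks ih =>
    intro hnd L hcov
    rw [List.flatMap_cons]
    have hks : ∀ b ∈ ks, L.filter (fun p => decide (key p = b))
        = (L.filter (fun p => !decide (key p = k))).filter (fun p => decide (key p = b)) := by
      intro b hb
      rw [List.filter_filter]
      apply List.filter_congr
      intro x _
      by_cases hx : key x = b
      · have hbk : ¬ b = k := by
          intro h; exact (List.nodup_cons.1 hnd).1 (h ▸ hb)
        simp [hx, hbk]
      · simp [hx]
    have hflat : ks.flatMap (fun b => L.filter (fun p => decide (key p = b)))
        = ks.flatMap (fun b => (L.filter (fun p => !decide (key p = k))).filter (fun p => decide (key p = b))) :=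
      List.flatMap_congr hks
    rw [hflat]
    have hperm2 := ih (List.nodup_cons.1 hnd).2 (L.filter (fun p => !decide (key p = k)))
      (by
        intro p hp
        rcases List.mem_filter.1 hp with ⟨hpL, hpk⟩
        rcases List.mem_cons.1 (hcov p hpL) with h | h
        · simp [h] at hpk
        · exact h)
    exact (List.Perm.append_left _ hperm2).trans (List.filter_append_perm _ L)

-- unmatched/matched selection over groups is a permutation of a filter of the original list
theorem pvSelect_perm {κ : Type} [DecidableEq κ] (key : (Int × String) → κ)
    (L : List (Int × String)) (ks : List κ) (hnd : ks.Nodup) (c : κ → Bool)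
    (P : (Int × String) → Bool)
    (hcov : ∀ p ∈ L, key p ∈ ks)
    (hP : ∀ p ∈ L, P p = c (key p)) :
    ((ks.filter c).flatMap (fun b => L.filter (fun p => key p = b))).Perm (L.filter P) := by
  have hbody : ∀ b ∈ ks.filter c,
      L.filter (fun p => decide (key p = b)) = (L.filter P).filter (fun p => decide (key p = b)) := by
    intro b hb
    rcases List.mem_filter.1 hb with ⟨_, hcb⟩
    rw [List.filter_filter]
    apply List.filter_congr
    intro p hp
    by_cases hk : key p = b
    · have : P p = true := by rw [hP p hp, hk]; exact hcb
      simp [hk, this]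
    · simp [hk]
  rw [List.flatMap_congr hbody]
  apply pvPerm_flatMap_filter
  · exact hnd.filter c
  · intro p hp
    rcases List.mem_filter.1 hp with ⟨hpL, hpP⟩
    exact List.mem_filter.2 ⟨hcov p hpL, by rw [← hP p hpL]; exact hpP⟩

-- a filter by a disjunction of disjoint tests splits as a permutation
theorem pvFilter_or_perm {α : Type} (l : List α) (a b : α → Bool)
    (h : ∀ x ∈ l, ¬(a x = true ∧ b x = true)) :
    (l.filter a ++ l.filter b).Perm (l.filter (fun x => a x || b x)) := by
  have h1 : (l.filter (fun x => a x || b x)).filter a = l.filter a := by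
    rw [List.filter_filter]
    apply List.filter_congr
    intro x hx
    by_cases hax : a x = true <;> simp [hax]
  have h2 : (l.filter (fun x => a x || b x)).filter (fun x => !a x) = l.filter b := by
    rw [List.filter_filter]
    apply List.filter_congr
    intro x hx
    by_cases hax : a x = true
    · have : ¬ b x = true := fun hbx => h x hx ⟨hax, hbx⟩
      simp [hax, Bool.not_eq_true] at this ⊢
      simp [this]
    · rw [Bool.not_eq_true] at hax
      simp [hax]
  have := List.filter_append_perm a (l.filter (fun x => a x || b x))
  rw [h1, h2] at this
  exact this

theorem pvToList_eq_cons_iff (y : String) (c : Char) (b : List Char) :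
    y.toList = c :: b ↔
      (PySem.List.pyGet? y.toList 0 = some c ∧ PySem.List.slice y.toList (some 1) none = b) := by
  simp only [PySem.List.pyGet?_zero, PySem.List.slice_from_one]
  cases hy : y.toList <;> simp_all

theorem pvContains_iff (f : List String) (c : Char) (b : List Char) :
    ((pvPairs c (PySem.List.enumerate f)).foldl pvMod PySem.Dict.empty).contains b = true
      ↔ ∃ y ∈ f, y.toList = c :: b := by
  have hshape : (pvPairs c (PySem.List.enumerate f)).foldl pvMod PySem.Dict.empty
      = (pvPairs c (PySem.List.enumerate f)).foldl
          (fun d x => d.modify ((fun (q : List Char × (Int × String)) => q.1) x) []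
            ((fun (_ : PySem.Dict (List Char) (List (Int × String))) (q : List Char × (Int × String)) =>
              (· ++ [q.2])) d x)) PySem.Dict.empty := rfl
  rw [PySem.Dict.contains_iff_mem_keys, hshape,
    PySem.Dict.keys_foldl_modify_key, PySem.Dict.keys_empty, PySem.Set.update_nil_left,
    PySem.Set.mem_ofList]
  constructor
  · intro hb
    rcases List.mem_map.1 hb with ⟨q, hq, rfl⟩
    rcases List.mem_map.1 (by simpa [pvPairs] using hq : q ∈ (((PySem.List.enumerate f).filter
      (fun p => PySem.Chars.pyGet? p.2.toList 0 == some c)).map (fun p => (pvBase p.2, p)))) with ⟨p, hp, rfl⟩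
    rcases List.mem_filter.1 hp with ⟨hpE, hph⟩
    refine ⟨p.2, ?_, ?_⟩
    · rw [← PySem.List.map_snd_enumerate f 0]
      exact List.mem_map_of_mem hpE
    · exact (pvToList_eq_cons_iff p.2 c (pvBase p.2)).2
        ⟨by simpa [beq_iff_eq, PySem.Chars.pyGet?_eq_listPyGet?] using hph,
         by simp [pvBase, PySem.Chars.slice_eq_listSlice]⟩
  · rintro ⟨y, hy, hyl⟩
    rcases List.mem_map.1 (by rw [PySem.List.map_snd_enumerate f 0] ; exact hy :
      y ∈ (PySem.List.enumerate f).map (fun x => x.2)) with ⟨p, hpE, hp2⟩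
    rcases (pvToList_eq_cons_iff y c b).1 hyl with ⟨hhd, htl⟩
    have : (pvBase p.2, p) ∈ pvPairs c (PySem.List.enumerate f) := by
      apply List.mem_map_of_mem
      exact List.mem_filter.2 ⟨hpE, by
        simp only [beq_iff_eq, PySem.Chars.pyGet?_eq_listPyGet?, hp2]
        exact hhd⟩
    have hb : pvBase p.2 = b := by
      simp only [pvBase, PySem.Chars.slice_eq_listSlice, hp2]
      exact htl
    exact List.mem_map.2 ⟨(pvBase p.2, p), this, hb⟩

theorem pvGetD_eq (f : List String) (c : Char) (b : List Char) :
    ((pvPairs c (PySem.List.enumerate f)).foldl pvMod PySem.Dict.empty).getD b []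
      = ((PySem.List.enumerate f).filter (fun p => PySem.Chars.pyGet? p.2.toList 0 == some c)).filter
          (fun p => pvBase p.2 == b) := by
  have hshape : (pvPairs c (PySem.List.enumerate f)).foldl pvMod PySem.Dict.empty
      = (pvPairs c (PySem.List.enumerate f)).foldl
          (fun d p => d.modify p.1 [] (· ++ [p.2])) PySem.Dict.empty := rfl
  rw [hshape, PySem.Dict.getD_foldl_modify_append, PySem.Dict.getD_empty]
  unfold pvPairs
  rw [List.filter_map, List.map_map, List.filter_filter]
  show [] ++ List.map (fun p => p)
      (List.filter (fun a => pvBase a.2 == b && (PySem.Chars.pyGet? a.2.toList 0 == some c))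
        (PySem.List.enumerate f)) = _
  rw [List.nil_append, List.map_id', List.filter_filter]

theorem pvKeys_eq (f : List String) (c : Char) :
    ((pvPairs c (PySem.List.enumerate f)).foldl pvMod PySem.Dict.empty).keys
      = PySem.Set.ofList ((pvPairs c (PySem.List.enumerate f)).map (fun q => q.1)) := by
  have hshape : (pvPairs c (PySem.List.enumerate f)).foldl pvMod PySem.Dict.empty
      = (pvPairs c (PySem.List.enumerate f)).foldl
          (fun d x => d.modify ((fun (q : List Char × (Int × String)) => q.1) x) []
            ((fun (_ : PySem.Dict (List Char) (List (Int × String))) (q : List Char × (Int × String)) =>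
              (· ++ [q.2])) d x)) PySem.Dict.empty := rfl
  rw [hshape, PySem.Dict.keys_foldl_modify_key, PySem.Dict.keys_empty, PySem.Set.update_nil_left]

theorem pvNodup_keys (f : List String) (c : Char) :
    ((pvPairs c (PySem.List.enumerate f)).foldl pvMod PySem.Dict.empty).keys.Nodup := by
  have hshape : (pvPairs c (PySem.List.enumerate f)).foldl pvMod PySem.Dict.empty
      = (pvPairs c (PySem.List.enumerate f)).foldl
          (fun d x => d.modify ((fun (q : List Char × (Int × String)) => q.1) x) []
            ((fun (_ : PySem.Dict (List Char) (List (Int × String))) (q : List Char × (Int × String)) =>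
              (· ++ [q.2])) d x)) PySem.Dict.empty := rfl
  rw [hshape]
  exact PySem.Dict.nodup_keys_foldl_modify_key _ _ _ _ _ PySem.Dict.nodup_keys_empty

theorem pvDict_flatMap (d : PySem.Dict (List Char) (List (Int × String)))
    (hnd : d.keys.Nodup) (cB : List Char → Bool) :
    ((d.items.filter (fun pr => cB pr.1)).flatMap (fun pr => pr.2))
      = (d.keys.filter cB).flatMap (fun k => d.getD k []) := by
  rw [PySem.Dict.items_eq_map_keys d hnd [], List.filter_map, List.flatMap_map]
  rfl

-- one side (sign c), one selection cB of the bases, is a permutation of one filter of enumerate f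
theorem pvSide_perm (f : List String) (c : Char) (cB : List Char → Bool) (P : String → Bool)
    (hrel : ∀ x : String, PySem.List.pyGet? x.toList 0 = some c → P x = cB (pvBase x)) :
    (let dc := (pvPairs c (PySem.List.enumerate f)).foldl pvMod PySem.Dict.empty
     ((dc.keys.filter cB).flatMap (fun k => dc.getD k []))).Perm
      ((PySem.List.enumerate f).filter
        (fun p => P p.2 && (PySem.Chars.pyGet? p.2.toList 0 == some c))) := by
  have hgetD : ∀ b, ((pvPairs c (PySem.List.enumerate f)).foldl pvMod PySem.Dict.empty).getD b []
      = ((PySem.List.enumerate f).filter (fun p => PySem.Chars.pyGet? p.2.toList 0 == some c)).filter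
          (fun p => decide (pvBase p.2 = b)) := by
    intro b
    rw [pvGetD_eq]
    apply List.filter_congr
    intro p _
    by_cases h : pvBase p.2 = b <;> simp [h]
  show (((((pvPairs c (PySem.List.enumerate f)).foldl pvMod PySem.Dict.empty).keys.filter cB).flatMap
      (fun k => ((pvPairs c (PySem.List.enumerate f)).foldl pvMod PySem.Dict.empty).getD k []))).Perm _
  rw [List.flatMap_congr (fun b _ => hgetD b)]
  have hperm := pvSelect_perm (fun p => pvBase p.2)
    ((PySem.List.enumerate f).filter (fun p => PySem.Chars.pyGet? p.2.toList 0 == some c))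
    ((pvPairs c (PySem.List.enumerate f)).foldl pvMod PySem.Dict.empty).keys
    (pvNodup_keys f c) cB (fun p => P p.2)
    (by
      intro p hp
      rcases List.mem_filter.1 hp with ⟨hpE, hph⟩
      rw [pvKeys_eq, PySem.Set.mem_ofList]
      exact List.mem_map.2 ⟨(pvBase p.2, p), List.mem_map_of_mem (List.mem_filter.2 ⟨hpE, hph⟩), rfl⟩)
    (by
      intro p hp
      rcases List.mem_filter.1 hp with ⟨_, hph⟩
      exact hrel p.2 (by simpa [beq_iff_eq, PySem.Chars.pyGet?_eq_listPyGet?] using hph))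
  refine hperm.trans ?_
  rw [List.filter_filter]

set_option maxHeartbeats 2000000 in
theorem main_eq (f : List String) : hashpair f = hashpair_alt f := by
  have hA : hashpair f = ((f.countP (pvCnt f) : Int), f.filter (pvKeep f)) := by
    unfold hashpair; rw [pvA_char]; simp
  have hB : hashpair_alt f =
      (pvBPhase ((pvPairs '+' (PySem.List.enumerate f)).foldl pvMod PySem.Dict.empty)
        (pvBPhase ((pvPairs '-' (PySem.List.enumerate f)).foldl pvMod PySem.Dict.empty) (0, [])
          ((pvPairs '+' (PySem.List.enumerate f)).foldl pvMod PySem.Dict.empty))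
        ((pvPairs '-' (PySem.List.enumerate f)).foldl pvMod PySem.Dict.empty) |>.1,
       (PySem.List.sorted
        (pvBPhase ((pvPairs '+' (PySem.List.enumerate f)).foldl pvMod PySem.Dict.empty)
          (pvBPhase ((pvPairs '-' (PySem.List.enumerate f)).foldl pvMod PySem.Dict.empty) (0, [])
            ((pvPairs '+' (PySem.List.enumerate f)).foldl pvMod PySem.Dict.empty))
          ((pvPairs '-' (PySem.List.enumerate f)).foldl pvMod PySem.Dict.empty) |>.2)
        (fun t => t.1) false).map (fun t => t.2)) := by
    unfold hashpair_alt
    rw [pvBuild_split]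
  set E := PySem.List.enumerate f with hEdef
  set plusD := (pvPairs '+' E).foldl pvMod PySem.Dict.empty with hPdef
  set minusD := (pvPairs '-' E).foldl pvMod PySem.Dict.empty with hMdef
  -- compute B's two phases
  have hst1 : pvBPhase minusD (0, []) plusD
      = (0 + ((((plusD.items.filter (fun pr => minusD.contains pr.1)).flatMap (·.2)).length : Nat) : Int),
         [] ++ (plusD.items.filter (fun pr => !minusD.contains pr.1)).flatMap (·.2)) := by
    unfold pvBPhase; rw [pvPhase_char]
  have hst2 := pvPhase_char plusD minusD.items
      (0 + ((((plusD.items.filter (fun pr => minusD.contains pr.1)).flatMap (·.2)).length : Nat) : Int))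
      ([] ++ (plusD.items.filter (fun pr => !minusD.contains pr.1)).flatMap (·.2))
  rw [hA, hB, hst1]
  unfold pvBPhase
  rw [hst2]
  -- abbreviations
  have hopM : ∀ x : String, pvOpp f '-' x = minusD.contains (pvBase x) := by
    intro x
    by_cases h : ∃ y ∈ f, y.toList = '-' :: pvBase x
    · have h1 : pvOpp f '-' x = true := by
        simpa [pvOpp, List.any_eq_true, beq_iff_eq] using h
      rw [h1, (pvContains_iff f '-' (pvBase x)).2 h]
    · have h1 : pvOpp f '-' x = false := by
        rw [← Bool.not_eq_true]; intro hc
        exact h (by simpa [pvOpp, List.any_eq_true, beq_iff_eq] using hc)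
      have h2 : minusD.contains (pvBase x) = false := by
        rw [← Bool.not_eq_true]; intro hc
        exact h ((pvContains_iff f '-' (pvBase x)).1 hc)
      rw [h1, h2]
  have hopP : ∀ x : String, pvOpp f '+' x = plusD.contains (pvBase x) := by
    intro x
    by_cases h : ∃ y ∈ f, y.toList = '+' :: pvBase x
    · have h1 : pvOpp f '+' x = true := by
        simpa [pvOpp, List.any_eq_true, beq_iff_eq] using h
      rw [h1, (pvContains_iff f '+' (pvBase x)).2 h]
    · have h1 : pvOpp f '+' x = false := by
        rw [← Bool.not_eq_true]; intro hc
        exact h (by simpa [pvOpp, List.any_eq_true, beq_iff_eq] using hc)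
      have h2 : plusD.contains (pvBase x) = false := by
        rw [← Bool.not_eq_true]; intro hc
        exact h ((pvContains_iff f '+' (pvBase x)).1 hc)
      rw [h1, h2]
  -- the four flatMaps as permutations of filters of E
  have hkp : ((plusD.items.filter (fun pr => !minusD.contains pr.1)).flatMap (·.2)).Perm
      (E.filter (fun p => (!pvOpp f '-' p.2) && (PySem.Chars.pyGet? p.2.toList 0 == some '+'))) := by
    rw [pvDict_flatMap plusD (pvNodup_keys f '+') (fun k => !minusD.contains k)]
    have := pvSide_perm f '+' (fun b => !minusD.contains b) (fun x => !pvOpp f '-' x)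
      (fun x _ => by show (!pvOpp f '-' x) = (!minusD.contains (pvBase x)); rw [hopM])
    simpa using this
  have hkm : ((minusD.items.filter (fun pr => !plusD.contains pr.1)).flatMap (·.2)).Perm
      (E.filter (fun p => (!pvOpp f '+' p.2) && (PySem.Chars.pyGet? p.2.toList 0 == some '-'))) := by
    rw [pvDict_flatMap minusD (pvNodup_keys f '-') (fun k => !plusD.contains k)]
    have := pvSide_perm f '-' (fun b => !plusD.contains b) (fun x => !pvOpp f '+' x)
      (fun x _ => by show (!pvOpp f '+' x) = (!plusD.contains (pvBase x)); rw [hopP])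
    simpa using this
  have hcp : ((plusD.items.filter (fun pr => minusD.contains pr.1)).flatMap (·.2)).Perm
      (E.filter (fun p => (pvOpp f '-' p.2) && (PySem.Chars.pyGet? p.2.toList 0 == some '+'))) := by
    rw [pvDict_flatMap plusD (pvNodup_keys f '+') (fun k => minusD.contains k)]
    have := pvSide_perm f '+' (fun b => minusD.contains b) (fun x => pvOpp f '-' x)
      (fun x _ => by show pvOpp f '-' x = minusD.contains (pvBase x); exact hopM x)
    simpa using this
  have hcm : ((minusD.items.filter (fun pr => plusD.contains pr.1)).flatMap (·.2)).Perm
      (E.filter (fun p => (pvOpp f '+' p.2) && (PySem.Chars.pyGet? p.2.toList 0 == some '-'))) := by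
    rw [pvDict_flatMap minusD (pvNodup_keys f '-') (fun k => plusD.contains k)]
    have := pvSide_perm f '-' (fun b => plusD.contains b) (fun x => pvOpp f '+' x)
      (fun x _ => by show pvOpp f '+' x = plusD.contains (pvBase x); exact hopP x)
    simpa using this
  -- flip the conjunctions
  have hflip : ∀ (P : String → Bool) (c : Char),
      E.filter (fun p => (P p.2) && (PySem.Chars.pyGet? p.2.toList 0 == some c))
        = E.filter (fun p => (PySem.Chars.pyGet? p.2.toList 0 == some c) && P p.2) :=
    fun P c => List.filter_congr (fun p _ => Bool.and_comm _ _)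
  -- disjointness of the signs
  have hdisj : ∀ (P Q : String → Bool) (p : Int × String),
      ¬(((PySem.Chars.pyGet? p.2.toList 0 == some '+') && P p.2) = true
        ∧ ((PySem.Chars.pyGet? p.2.toList 0 == some '-') && Q p.2) = true) := by
    rintro P Q p ⟨h1, h2⟩
    simp only [Bool.and_eq_true, beq_iff_eq] at h1 h2
    rw [h1.1] at h2
    exact absurd h2.1 (by simp)
  -- keep side
  have hkeep : ((((plusD.items.filter (fun pr => !minusD.contains pr.1)).flatMap (·.2))
        ++ ((minusD.items.filter (fun pr => !plusD.contains pr.1)).flatMap (·.2)))).Perm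
      (E.filter (fun p => pvKeep f p.2)) := by
    refine ((hkp.append hkm).trans ?_)
    rw [hflip (fun x => !pvOpp f '-' x) '+', hflip (fun x => !pvOpp f '+' x) '-']
    have := pvFilter_or_perm E
      (fun p => (PySem.Chars.pyGet? p.2.toList 0 == some '+') && !pvOpp f '-' p.2)
      (fun p => (PySem.Chars.pyGet? p.2.toList 0 == some '-') && !pvOpp f '+' p.2)
      (fun p _ => by exact hdisj (fun x => !pvOpp f '-' x) (fun x => !pvOpp f '+' x) p)
    exact this
  -- count side
  have hcnt : ((((plusD.items.filter (fun pr => minusD.contains pr.1)).flatMap (·.2))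
        ++ ((minusD.items.filter (fun pr => plusD.contains pr.1)).flatMap (·.2)))).Perm
      (E.filter (fun p => pvCnt f p.2)) := by
    refine ((hcp.append hcm).trans ?_)
    rw [hflip (fun x => pvOpp f '-' x) '+', hflip (fun x => pvOpp f '+' x) '-']
    have := pvFilter_or_perm E
      (fun p => (PySem.Chars.pyGet? p.2.toList 0 == some '+') && pvOpp f '-' p.2)
      (fun p => (PySem.Chars.pyGet? p.2.toList 0 == some '-') && pvOpp f '+' p.2)
      (fun p _ => by exact hdisj (fun x => pvOpp f '-' x) (fun x => pvOpp f '+' x) p)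
    exact this
  -- relate f-level filters/counts to E-level
  have hgen : ∀ q : String → Bool,
      ((PySem.List.enumerate f).filter (fun p => q p.2)).map (fun t => t.2) = f.filter q := by
    intro q
    conv_rhs => rw [← PySem.List.map_snd_enumerate f 0]
    rw [List.filter_map]
    rfl
  have hcount : ∀ q : String → Bool,
      f.countP q = ((PySem.List.enumerate f).filter (fun p => q p.2)).length := by
    intro q
    rw [List.countP_eq_length_filter]
    conv_lhs => rw [← PySem.List.map_snd_enumerate f 0]
    rw [List.filter_map, List.length_map]
    rfl
  -- assemble
  refine Prod.ext ?_ ?_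
  · have hlen := hcnt.length_eq
    rw [List.length_append] at hlen
    show (f.countP (pvCnt f) : Int) = _
    rw [hcount (pvCnt f), ← hEdef, ← hlen]
    push_cast; ring
  · show f.filter (pvKeep f) = _
    rw [List.nil_append]
    have hsorted : PySem.List.sorted
        ((plusD.items.filter (fun pr => !minusD.contains pr.1)).flatMap (·.2)
          ++ (minusD.items.filter (fun pr => !plusD.contains pr.1)).flatMap (·.2))
        (fun t => t.1) false
        = E.filter (fun p => pvKeep f p.2) := by
      apply PySem.List.sorted_eq_of_perm_of_pairwise_lt
      · exact hkeep.symm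
      · rw [hEdef]
        exact (PySem.List.pairwise_lt_enumerate f 0).filter _
    rw [hsorted, ← hgen (pvKeep f), ← hEdef]

-- ===== VERDICT =====
theorem hashpair_spec : Claim_equal_hashpair := by
  intro f _ _
  exact main_eq f
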